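-- pv_equiv track=rewrite | github.com/pypi-data/pypi-mirror-121 | packages/lovpy/lovpy-0.0.1.tar.gz/lovpy-0.0.1/logipy/importer/text_converter.py | transform_lines
-- ===== SOURCE A (Python) =====
-- SPECIALS = '+/%,!?:;"()<>[]#$=-/\n '  # All special characters of python.
--
-- LOGIPY_KEYWORDS = []  # All newly introduced keywords by logipy.
--
-- def transform_lines(lines):
--     """Transforms lines of python code into a logipy testable unit."""
--     new_lines = ["from logipy import LogipyPrimitive, logipy_call\n"]
--
--     for line in lines:
--         if (line.startswith("import ") or line.startswith("from ") or
--                 line.strip().startswith("def ") or line.strip().startswith("class ")):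
--             # Nothing to change on imports and functions/classes definition.
--             new_lines.append(line)
--         else:
--             new_line = ""
--             primitive = ""
--
--             for c in line:
--                 # Parse each line, primitive by primitive.
--                 if c in SPECIALS:  # When a special character is found, primitive is over.
--                     if (c == '('
--                             and primitive
--                             and primitive not in LOGIPY_KEYWORDS
--                             and "." != primitive[0]):
--                         # Pass all callable objects as the first argument to a logipy_call call.
--                         primitive = "logipy_call(" + primitive + ","
--                         c = ""
--                     # elif primitive and primitive not in keywords:
--                     #     primitive = "LogipyPrimitive("+primitive+")"
--                     new_line += primitive + c
--                     primitive = ""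
--                 else:  # While not encountering a special character, keep building the primitive.
--                     primitive += c
--
--             if primitive:
--                 # TODO: Is this branch ever reachable? '\n' should normally terminate each line.
--                 new_line += "LogipyPrimitive(" + primitive + ")"
--
--             new_lines.append(new_line)
--
--     return new_lines
-- ===== SOURCE B (Python) =====
-- import re
--
-- SPECIALS = '+/%,!?:;"()<>[]#$=-/\n '  # All special characters of python.
--
-- LOGIPY_KEYWORDS = []  # All newly introduced keywords by logipy.
--
-- _SPLITTER = re.compile('([+/%,!?:;"()<>\\[\\]#$=\\-\n ])')
--
--
-- def transform_lines(lines):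
--     """Transforms lines of python code into a logipy testable unit."""
--     new_lines = ["from logipy import LogipyPrimitive, logipy_call\n"]
--
--     for line in lines:
--         if (line.startswith("import ") or line.startswith("from ") or
--                 line.strip().startswith("def ") or line.strip().startswith("class ")):
--             new_lines.append(line)
--             continue
--
--         # Tokenize once: alternating [token, separator, token, ..., token].
--         parts = _SPLITTER.split(line)
--         pieces = []
--         for i in range(0, len(parts) - 1, 2):
--             token, sep = parts[i], parts[i + 1]
--             if (sep == '(' and token and token not in LOGIPY_KEYWORDS
--                     and token[0] != '.'):
--                 pieces.append('logipy_call(' + token + ',')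
--             else:
--                 pieces.append(token + sep)
--         tail = parts[-1]
--         if tail:
--             pieces.append('LogipyPrimitive(' + tail + ')')
--         new_lines.append(''.join(pieces))
--
--     return new_lines
-- ===== Notes on version B (the rewrite author's own statement) =====
-- stated objective: idiomatic
-- what changed: B replaces A's character-by-character state machine (accumulating a 'primitive' buffer inside a char loop) by a single regex split into alternating token/separator parts followed by a pass over (token, separator) pairs joined at the end.
import Mathlib
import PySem

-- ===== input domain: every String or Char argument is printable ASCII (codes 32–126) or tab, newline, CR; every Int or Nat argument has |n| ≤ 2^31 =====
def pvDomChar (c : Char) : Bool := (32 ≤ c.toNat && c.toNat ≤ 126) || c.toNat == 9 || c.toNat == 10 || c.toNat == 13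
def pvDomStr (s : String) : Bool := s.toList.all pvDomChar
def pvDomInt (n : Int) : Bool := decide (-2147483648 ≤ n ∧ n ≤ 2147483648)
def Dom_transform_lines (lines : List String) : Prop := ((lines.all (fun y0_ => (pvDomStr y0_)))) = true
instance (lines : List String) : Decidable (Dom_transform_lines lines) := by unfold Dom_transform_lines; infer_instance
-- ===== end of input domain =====

-- One honest line: B tokenizes each line once (split on the SPECIALS class, keeping
-- separators) and maps over (token, separator) pairs, instead of A's per-character
-- state machine; objective: idiomatic decomposition, same cost.

-- Characters of the Python constant SPECIALS (the duplicate '/' of the literal kept).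
def pvSpecials : List Char := "+/%,!?:;\"()<>[]#$=-/\n ".toList

def pvKeywords : List String := []  -- LOGIPY_KEYWORDS

-- the import/from/def/class guard, shared verbatim by both Pythons
def pvGuard (line : String) : Bool :=
  PySem.Str.startswith line "import " || PySem.Str.startswith line "from " ||
  PySem.Str.startswith (PySem.Str.strip line) "def " ||
  PySem.Str.startswith (PySem.Str.strip line) "class "

-- ===== PORT A =====
-- A's inner char loop: state = (new_line, primitive), both as List Char.
def pvAStep (st : List Char × List Char) (c : Char) : List Char × List Char :=
  if c ∈ pvSpecials then
    if c = '(' ∧ st.2 ≠ [] ∧ String.mk st.2 ∉ pvKeywords ∧ st.2.head? ≠ some '.' then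
      (st.1 ++ ("logipy_call(".toList ++ st.2 ++ [',']), [])
    else
      (st.1 ++ st.2 ++ [c], [])
  else
    (st.1, st.2 ++ [c])

def pvALine (l : List Char) : List Char :=
  let st := l.foldl pvAStep ([], [])
  if st.2 = [] then st.1
  else st.1 ++ ("LogipyPrimitive(".toList ++ st.2 ++ [')'])

def transform_lines (lines : List String) : List String :=
  "from logipy import LogipyPrimitive, logipy_call\n" ::
    lines.map (fun line =>
      if pvGuard line then line else String.mk (pvALine line.toList))

-- ===== PORT B =====
-- B's tokenizer: splits a line into alternating (token, separator) pairs plus a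
-- trailing token (the regex split of Source B).
def pvTok : List Char → List (List Char × Char) × List Char
  | [] => ([], [])
  | c :: rest =>
    let r := pvTok rest
    if c ∈ pvSpecials then (([], c) :: r.1, r.2)
    else
      match r.1 with
      | [] => ([], c :: r.2)
      | (tk, s) :: ps => ((c :: tk, s) :: ps, r.2)

-- one (token, separator) pair of Source B's loop body
def pvWrap (p : List Char × Char) : List Char :=
  if p.2 = '(' ∧ p.1 ≠ [] ∧ String.mk p.1 ∉ pvKeywords ∧ p.1.head? ≠ some '.' then
    "logipy_call(".toList ++ p.1 ++ [',']
  else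
    p.1 ++ [p.2]

def pvBLine (l : List Char) : List Char :=
  let r := pvTok l
  (r.1.map pvWrap).flatten ++
    (if r.2 = [] then [] else "LogipyPrimitive(".toList ++ r.2 ++ [')'])

def transform_lines_alt (lines : List String) : List String :=
  "from logipy import LogipyPrimitive, logipy_call\n" ::
    lines.map (fun line =>
      if pvGuard line then line else String.mk (pvBLine line.toList))

-- ===== PRECONDITION & SPEC =====
def Spec_transform_lines (lines : List String) (out : List String) : Prop := out = transform_lines_alt lines
instance (lines : List String) (out : List String) : Decidable (Spec_transform_lines lines out) := by unfold Spec_transform_lines; infer_instance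

-- ===== CLAIM (what is proved, stated in full; the proofs are below) =====
def Claim_equal_transform_lines : Prop := ∀ (lines : List String), Dom_transform_lines lines → Spec_transform_lines lines (transform_lines lines)

-- ===== LEMMAS AND PROOFS =====

-- finishing step of A's line loop, parametrised by the pending state
def pvFinishA (st : List Char × List Char) : List Char :=
  if st.2 = [] then st.1
  else st.1 ++ ("LogipyPrimitive(".toList ++ st.2 ++ [')'])

-- B's rendering with a prefix `prim` glued onto the first token (or the tail)
def pvBRest (prim : List Char) (l : List Char) : List Char :=
  match pvTok l with
  | ([], t) =>
      if prim ++ t = [] then []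
      else "LogipyPrimitive(".toList ++ (prim ++ t) ++ [')']
  | ((tk, s) :: ps, t) =>
      pvWrap (prim ++ tk, s) ++ (ps.map pvWrap).flatten ++
        (if t = [] then [] else "LogipyPrimitive(".toList ++ t ++ [')'])

theorem pvKey (l : List Char) : ∀ (nl prim : List Char),
    pvFinishA (l.foldl pvAStep (nl, prim)) = nl ++ pvBRest prim l := by
  induction l with
  | nil =>
    intro nl prim
    simp only [List.foldl, pvFinishA, pvBRest, pvTok, List.append_nil]
    split <;> simp_all
  | cons c rest ih =>
    intro nl prim
    simp only [List.foldl, pvAStep]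
    by_cases hs : c ∈ pvSpecials
    · simp only [if_pos hs]
      by_cases hc : c = '(' ∧ prim ≠ [] ∧ String.mk prim ∉ pvKeywords ∧ prim.head? ≠ some '.'
      · rw [if_pos hc, ih]
        simp only [pvBRest, pvTok, if_pos hs]
        rcases h : pvTok rest with ⟨ps, t⟩
        simp only [h]
        rw [pvWrap, if_pos (by simpa using hc)]
        cases ps <;> simp [pvBRest, h, List.append_assoc]
      · rw [if_neg hc, ih]
        simp only [pvBRest, pvTok, if_pos hs]
        rcases h : pvTok rest with ⟨ps, t⟩
        simp only [h]
        rw [pvWrap, if_neg (by simpa using hc)]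
        cases ps <;> simp [pvBRest, h, List.append_assoc]
    · simp only [if_neg hs]
      rw [ih]
      simp only [pvBRest, pvTok, if_neg hs]
      rcases h : pvTok rest with ⟨ps, t⟩
      cases ps <;> simp [h, List.append_assoc]

theorem pvLine_eq (l : List Char) : pvALine l = pvBLine l := by
  have h := pvKey l [] []
  simp only [pvALine, pvBLine, pvBRest, pvFinishA] at *
  rcases ht : pvTok l with ⟨ps, t⟩
  rw [ht] at h
  cases ps <;> simp_all

-- ===== VERDICT (by name: the statement is the Claim_ definition above) =====
theorem transform_lines_spec : Claim_equal_transform_lines := by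
  intro lines _
  unfold Spec_transform_lines transform_lines transform_lines_alt
  simp [pvLine_eq]
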